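-- pv_equiv track=rewrite | github.com/UlsanCollege-English/week-13-problem-2-course-enrollment-roster-adronnie | main.py | build_roster
-- ===== SOURCE A (Python) =====
-- def build_roster(registrations):
--     roster = {}  # course_id -> set of student_ids
--
--     # Step 1: Build dictionary of sets to remove duplicates
--     for student_id, course_id in registrations:
--         if course_id not in roster:
--             roster[course_id] = set()
--         roster[course_id].add(student_id)
--
--     # Step 2: Convert each set into a sorted list
--     final_roster = {}
--     for course_id, student_set in roster.items():
--         final_roster[course_id] = sorted(student_set)
--
--     return final_roster
-- ===== SOURCE B (Python) =====
-- def build_roster(registrations):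
--     roster = {}  # course_id -> sorted, duplicate-free list of student_ids
--
--     # Single pass: keep each course's roster sorted and duplicate-free
--     # by inserting every student at its sorted position (skip if present).
--     for student_id, course_id in registrations:
--         lst = roster.get(course_id, [])
--         i = 0
--         while i < len(lst) and lst[i] < student_id:
--             i += 1
--         if i == len(lst) or lst[i] != student_id:
--             lst.insert(i, student_id)
--         roster[course_id] = lst
--
--     return roster
-- ===== Notes on version B (the rewrite author's own statement) =====
-- stated objective: alternative
-- what changed: B keeps each course's roster as a sorted duplicate-free list by online sorted insertion in a single pass, instead of A's two-phase dict-of-sets accumulation followed by sorting every set.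
import Mathlib
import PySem

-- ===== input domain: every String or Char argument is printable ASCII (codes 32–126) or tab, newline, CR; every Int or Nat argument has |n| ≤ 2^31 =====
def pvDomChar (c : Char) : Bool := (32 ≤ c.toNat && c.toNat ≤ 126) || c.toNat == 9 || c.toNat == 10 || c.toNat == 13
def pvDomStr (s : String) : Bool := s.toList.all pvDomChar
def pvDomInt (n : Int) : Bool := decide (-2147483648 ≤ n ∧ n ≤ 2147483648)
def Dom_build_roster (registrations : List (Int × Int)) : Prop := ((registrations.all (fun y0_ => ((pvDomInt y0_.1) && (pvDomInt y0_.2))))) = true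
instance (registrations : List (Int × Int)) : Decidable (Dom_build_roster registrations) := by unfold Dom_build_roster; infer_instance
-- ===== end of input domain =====

-- B replaces A's two-phase "dict of sets, then sort each set" by a single pass that keeps
-- every course's roster sorted and duplicate-free via in-place sorted insertion (objective: alternative).

-- ===== PORT A =====
-- Step 1 builds a dict course_id -> set of student_ids; step 2 sorts each set into a fresh dict.
-- sorted(student_set) iterates the set in hash order, but sorting distinct ints is order-independent,
-- so sorting the Set's insertion-order list is exact.
def build_roster (registrations : List (Int × Int)) : List (Int × List Int) :=
  let roster := registrations.foldl (fun d p =>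
    let d := if d.contains p.2 then d else d.insert p.2 ([] : PySem.Set Int)
    d.modify p.2 [] (fun st => PySem.Set.add st p.1)) PySem.Dict.empty
  let final := roster.items.foldl (fun fd q =>
    fd.insert q.1 (PySem.List.sorted q.2 (fun x => x) false)) PySem.Dict.empty
  final.items

-- ===== PORT B =====
-- Hand port (exact) of Source B's while-loop + conditional list.insert: walk past the elements < s,
-- then insert s unless it is already there.
def insortU : List Int → Int → List Int
  | [], s => [s]
  | x :: xs, s =>
      if x < s then x :: insortU xs s
      else if x = s then x :: xs
      else s :: x :: xs

def build_roster_alt (registrations : List (Int × Int)) : List (Int × List Int) :=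
  (registrations.foldl (fun d p =>
    d.insert p.2 (insortU (d.getD p.2 []) p.1)) PySem.Dict.empty).items

-- ===== PRECONDITION & SPEC =====
def Spec_build_roster (registrations : List (Int × Int)) (out : List (Int × List Int)) : Prop := out = build_roster_alt registrations
instance (registrations : List (Int × Int)) (out : List (Int × List Int)) : Decidable (Spec_build_roster registrations out) := by unfold Spec_build_roster; infer_instance

-- ===== CLAIM (what is proved, stated in full; the proofs are below) =====
def Claim_equal_build_roster : Prop := ∀ (registrations : List (Int × Int)), Dom_build_roster registrations → Spec_build_roster registrations (build_roster registrations)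

-- ===== LEMMAS AND PROOFS =====

lemma mem_insortU (L : List Int) (s y : Int) : y ∈ insortU L s ↔ y = s ∨ y ∈ L := by
  induction L with
  | nil => simp [insortU]
  | cons x xs ih =>
      simp only [insortU]
      split_ifs with h1 h2
      · simp only [List.mem_cons, ih]
        tauto
      · simp only [List.mem_cons, h2]
        tauto
      · simp only [List.mem_cons]

lemma insortU_perm (L : List Int) (s : Int) (hs : s ∉ L) : (insortU L s).Perm (L ++ [s]) := by
  induction L with
  | nil => simp [insortU]
  | cons x xs ih =>
      simp only [insortU]
      split_ifs with h1 h2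
      · exact (ih (fun h => hs (List.mem_cons_of_mem _ h))).cons x
      · exact absurd (h2 ▸ List.mem_cons_self) hs
      · exact (List.perm_append_singleton s (x :: xs)).symm

lemma insortU_pairwise (L : List Int) (s : Int) (h : L.Pairwise (· ≤ ·)) :
    (insortU L s).Pairwise (· ≤ ·) := by
  induction L with
  | nil => simp [insortU]
  | cons x xs ih =>
      rw [List.pairwise_cons] at h
      simp only [insortU]
      split_ifs with h1 h2
      · refine List.Pairwise.cons (fun y hy => ?_) (ih h.2)
        rcases (mem_insortU xs s y).mp hy with rfl | hy
        · exact le_of_lt h1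
        · exact h.1 y hy
      · exact List.Pairwise.cons h.1 h.2
      · refine List.Pairwise.cons (fun y hy => ?_) (List.Pairwise.cons h.1 h.2)
        have hsx : s ≤ x := le_of_not_gt h1
        rcases List.mem_cons.mp hy with rfl | hy
        · exact hsx
        · exact le_trans hsx (h.1 y hy)

lemma insortU_eq_self_of_mem (L : List Int) (s : Int) (h : L.Pairwise (· ≤ ·)) (hs : s ∈ L) :
    insortU L s = L := by
  induction L with
  | nil => cases hs
  | cons x xs ih =>
      rw [List.pairwise_cons] at h
      simp only [insortU]
      split_ifs with h1 h2
      · have hxs : s ∈ xs := by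
          rcases List.mem_cons.mp hs with rfl | hxs
          · exact absurd h1 (lt_irrefl s)
          · exact hxs
        rw [ih h.2 hxs]
      · rfl
      · exfalso
        have hxs : s ∈ xs := by
          rcases List.mem_cons.mp hs with rfl | hxs
          · exact absurd rfl h2
          · exact hxs
        exact h1 (lt_of_le_of_ne (h.1 s hxs) h2)

-- the one-element step: sorting after a set-add is the same as sorted insertion into the sorted list
lemma add_sorted (st : List Int) (s : Int) :
    PySem.List.sorted (PySem.Set.add st s) (fun x => x) false
      = insortU (PySem.List.sorted st (fun x => x) false) s := by
  have hpw : (PySem.List.sorted st (fun x => x) false).Pairwise (· ≤ ·) := by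
    simpa using PySem.List.sorted_pairwise st (fun x => x)
  by_cases hs : s ∈ st
  · have hadd : PySem.Set.add st s = st := by
      simp [PySem.Set.add, PySem.Set.contains, hs]
    rw [hadd, insortU_eq_self_of_mem _ _ hpw ((PySem.List.mem_sorted st _ false s).mpr hs)]
  · have hadd : PySem.Set.add st s = st ++ [s] := by
      simp [PySem.Set.add, PySem.Set.contains, hs]
    rw [hadd]
    refine PySem.List.eq_of_perm_of_pairwise_le_of_injective (fun x : Int => x)
      (fun a b h => h) ?_ ?_ ?_
    · refine (PySem.List.sorted_perm (st ++ [s]) _ false).trans ?_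
      refine ((insortU_perm _ s (fun h => hs ((PySem.List.mem_sorted st _ false s).mp h))).trans ?_).symm
      exact ((PySem.List.sorted_perm st _ false).append (List.Perm.refl [s]))
    · simpa using PySem.List.sorted_pairwise (st ++ [s]) (fun x => x)
    · exact insortU_pairwise _ s hpw

-- one step of A's grouping loop, seen through getD
lemma stepA_getD (d : PySem.Dict Int (List Int)) (s c k : Int) :
    (((if d.contains c then d else d.insert c ([] : PySem.Set Int)).modify c []
        (fun st => PySem.Set.add st s)).getD k [])
      = if k = c then PySem.Set.add (d.getD c []) s else d.getD k [] := by
  by_cases hc : d.contains c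
  · simp [hc, PySem.Dict.getD_modify]
  · simp only [hc, Bool.false_eq_true, if_false]
    rw [PySem.Dict.getD_modify]
    by_cases hk : k = c
    · subst hk
      simp [PySem.Dict.getD_of_not_contains d ([] : List Int) (by simpa using hc)]
    · simp [hk, PySem.Dict.getD_insert_of_ne d _ _ hk]

lemma stepA_keys (d : PySem.Dict Int (List Int)) (s c : Int) :
    ((if d.contains c then d else d.insert c ([] : PySem.Set Int)).modify c []
        (fun st => PySem.Set.add st s)).keys
      = if d.contains c then d.keys else d.keys ++ [c] := by
  by_cases hc : d.contains c
  · rw [PySem.Dict.keys_modify, PySem.Dict.keys_insert_of_contains]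
    · simp [hc]
    · simp [hc]
  · simp only [hc, Bool.false_eq_true, if_false]
    rw [PySem.Dict.keys_modify, PySem.Dict.keys_insert_of_contains,
        PySem.Dict.keys_insert_of_not_contains d _ (by simpa using hc)]
    exact PySem.Dict.contains_insert_self d c ([] : List Int)

lemma stepB_keys (d : PySem.Dict Int (List Int)) (v : List Int) (c : Int) :
    (d.insert c v).keys = if d.contains c then d.keys else d.keys ++ [c] := by
  by_cases hc : d.contains c
  · rw [PySem.Dict.keys_insert_of_contains d v hc]; simp [hc]
  · rw [PySem.Dict.keys_insert_of_not_contains d v (by simpa using hc)]; simp [hc]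

-- the loop invariant: B's dict holds exactly the sorted versions of A's sets, key for key
lemma roster_loop (regs : List (Int × Int)) :
    ∀ (dA dB : PySem.Dict Int (List Int)),
    dA.keys = dB.keys → dA.keys.Nodup →
    (∀ k, dB.getD k [] = PySem.List.sorted (dA.getD k []) (fun x => x) false) →
    ((regs.foldl (fun d p =>
        let d := if d.contains p.2 then d else d.insert p.2 ([] : PySem.Set Int)
        d.modify p.2 [] (fun st => PySem.Set.add st p.1)) dA).keys
       = (regs.foldl (fun d p => d.insert p.2 (insortU (d.getD p.2 []) p.1)) dB).keys
     ∧ (regs.foldl (fun d p =>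
        let d := if d.contains p.2 then d else d.insert p.2 ([] : PySem.Set Int)
        d.modify p.2 [] (fun st => PySem.Set.add st p.1)) dA).keys.Nodup
     ∧ ∀ k, (regs.foldl (fun d p => d.insert p.2 (insortU (d.getD p.2 []) p.1)) dB).getD k []
        = PySem.List.sorted ((regs.foldl (fun d p =>
            let d := if d.contains p.2 then d else d.insert p.2 ([] : PySem.Set Int)
            d.modify p.2 [] (fun st => PySem.Set.add st p.1)) dA).getD k []) (fun x => x) false) := by
  induction regs with
  | nil => intro dA dB hk hnd hpt; exact ⟨hk, hnd, hpt⟩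
  | cons p regs ih =>
      intro dA dB hk hnd hpt
      simp only [List.foldl_cons]
      have hcc : dA.contains p.2 = dB.contains p.2 := by
        rw [PySem.Dict.contains_eq_decide_mem_keys, PySem.Dict.contains_eq_decide_mem_keys, hk]
      refine ih _ _ ?_ ?_ ?_
      · rw [stepA_keys, stepB_keys, hcc, hk]
      · rw [stepA_keys]
        by_cases hc : dA.contains p.2
        · simpa [hc] using hnd
        · have hmem : p.2 ∉ dA.keys := by
            rw [PySem.Dict.contains_eq_decide_mem_keys] at hc; simpa using hc
          simp [hc, List.nodup_append, hnd]
          exact fun a ha h => hmem (h ▸ ha)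
      · intro k
        rw [stepA_getD, PySem.Dict.getD_insert]
        by_cases hkc : k = p.2
        · simp only [hkc, if_true, hpt p.2, add_sorted]
        · simp only [hkc, if_false, hpt k]

-- ===== VERDICT (by name: the statement is the Claim_ definition above) =====
theorem build_roster_spec : Claim_equal_build_roster := by
  intro regs _
  show build_roster regs = build_roster_alt regs
  unfold build_roster build_roster_alt
  obtain ⟨hk, hnd, hpt⟩ := roster_loop regs PySem.Dict.empty PySem.Dict.empty rfl
    (by simp [PySem.Dict.keys, PySem.Dict.empty]) (fun k => by simp [PySem.Dict.getD_empty]; rfl)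
  set rA := regs.foldl (fun d p =>
    let d := if d.contains p.2 then d else d.insert p.2 ([] : PySem.Set Int)
    d.modify p.2 [] (fun st => PySem.Set.add st p.1)) PySem.Dict.empty with hrA
  set rB := regs.foldl (fun d p => d.insert p.2 (insortU (d.getD p.2 []) p.1)) PySem.Dict.empty with hrB
  rw [PySem.Dict.items_foldl_insert_fresh rA.items (fun q => q.1)
        (fun q => PySem.List.sorted q.2 (fun x => x) false) PySem.Dict.empty
        (fun a _ => PySem.Dict.contains_empty a.1) (by simpa [PySem.Dict.keys] using hnd)]
  rw [PySem.Dict.items_eq_map_keys rA hnd ([] : List Int),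
      PySem.Dict.items_eq_map_keys rB (hk ▸ hnd) ([] : List Int), ← hk]
  simp only [List.map_map]
  refine List.map_congr_left (fun c _ => ?_)
  simp [hpt c]
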